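-- pv_equiv track=rewrite | github.com/rainysteven/d3_backend | backend/utils/dataUtil.py | get_group_number
-- ===== SOURCE A (Python) =====
-- def get_group_number(items, group_list):
--     group_number_list = []
--     for item in items:
--         for index, group in enumerate(group_list):
--             if item in group:
--                 group_number_list.append(index)
--                 break
--     return group_number_list
-- ===== SOURCE B (Python) =====
-- def get_group_number(items, group_list):
--     first_index = {}
--     for i, group in enumerate(group_list):
--         for x in group:
--             if x not in first_index:
--                 first_index[x] = i
--     return [first_index[item] for item in items if item in first_index]
-- ===== Notes on version B (the rewrite author's own statement) =====
-- stated objective: faster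
-- what changed: Replaces the per-item scan over all groups with a dict mapping each element to the index of its first containing group, built once, then one lookup per item.
import Mathlib
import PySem

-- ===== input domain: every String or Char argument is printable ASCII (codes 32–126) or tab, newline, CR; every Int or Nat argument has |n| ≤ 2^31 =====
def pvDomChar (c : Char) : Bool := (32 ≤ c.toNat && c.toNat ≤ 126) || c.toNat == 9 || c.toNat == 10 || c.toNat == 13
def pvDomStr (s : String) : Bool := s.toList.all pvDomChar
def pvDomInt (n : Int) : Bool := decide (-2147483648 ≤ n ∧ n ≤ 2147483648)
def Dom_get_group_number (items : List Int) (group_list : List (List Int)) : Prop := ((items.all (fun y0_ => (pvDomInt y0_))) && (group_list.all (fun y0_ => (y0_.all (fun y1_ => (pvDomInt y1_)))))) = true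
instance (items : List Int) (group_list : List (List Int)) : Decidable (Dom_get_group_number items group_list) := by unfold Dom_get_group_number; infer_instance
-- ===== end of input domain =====

-- B replaces A's per-item scan over all groups with a dict (element -> first group index) built once; faster (asymptotic).

-- ===== PORT A =====
-- inner 'for index, group in enumerate(group_list): if item in group: … break'
def aFind (item : Int) : List (Int × List Int) → Option Int
  | [] => none
  | (i, g) :: rest => if item ∈ g then some i else aFind item rest

def get_group_number (items : List Int) (group_list : List (List Int)) : List Int :=
  items.foldl (fun acc item =>
    match aFind item (PySem.List.enumerate group_list) with
    | some i => acc ++ [i]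
    | none => acc) []

-- ===== PORT B =====
-- 'for x in group: if x not in first_index: first_index[x] = i'
def bFillGroup (i : Int) (g : List Int) (d : PySem.Dict Int Int) : PySem.Dict Int Int :=
  g.foldl (fun d x => if d.contains x then d else d.insert x i) d

-- 'for i, group in enumerate(group_list): …'
def bBuild : List (Int × List Int) → PySem.Dict Int Int → PySem.Dict Int Int
  | [], d => d
  | (i, g) :: rest, d => bBuild rest (bFillGroup i g d)

def get_group_number_alt (items : List Int) (group_list : List (List Int)) : List Int :=
  let d := bBuild (PySem.List.enumerate group_list) PySem.Dict.empty
  items.filterMap (fun item => d.get? item)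

-- ===== PRECONDITION & SPEC =====
def Spec_get_group_number (items : List Int) (group_list : List (List Int)) (out : List Int) : Prop := out = get_group_number_alt items group_list
instance (items : List Int) (group_list : List (List Int)) (out : List Int) : Decidable (Spec_get_group_number items group_list out) := by unfold Spec_get_group_number; infer_instance

-- ===== CLAIM (what is proved, stated in full; the proofs are below) =====
def Claim_equal_get_group_number : Prop := ∀ (items : List Int) (group_list : List (List Int)), Dom_get_group_number items group_list → Spec_get_group_number items group_list (get_group_number items group_list)

-- ===== LEMMAS AND PROOFS =====

-- one group's fill: existing keys win, new keys of the group get index i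
lemma get?_bFillGroup (i : Int) (g : List Int) (d : PySem.Dict Int Int) (x : Int) :
    (bFillGroup i g d).get? x =
      match d.get? x with
      | some v => some v
      | none => if x ∈ g then some i else none := by
  induction g generalizing d with
  | nil => cases h : d.get? x <;> simp [bFillGroup, h]
  | cons y t ih =>
    have step : bFillGroup i (y :: t) d = bFillGroup i t (if d.contains y then d else d.insert y i) := rfl
    rw [step, ih]
    by_cases hc : d.contains y = true
    · simp only [hc, if_true]
      cases h : d.get? x <;> simp only [h]
      rcases eq_or_ne x y with rfl | hxy
      · rw [PySem.Dict.contains_eq_isSome_get?, h] at hc; simp at hc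
      · simp [hxy]
    · simp only [hc, if_false, Bool.false_eq_true, PySem.Dict.get?_insert]
      rcases eq_or_ne x y with rfl | hxy
      · rw [PySem.Dict.contains_eq_isSome_get?] at hc
        cases h : d.get? x <;> simp [h] at hc ⊢
      · simp only [hxy, if_false]
        cases h : d.get? x <;> simp [h, hxy]

-- the whole build: lookup in the built dict is A's first-match search
lemma get?_bBuild (l : List (Int × List Int)) (d : PySem.Dict Int Int) (x : Int) :
    (bBuild l d).get? x =
      match d.get? x with
      | some v => some v
      | none => aFind x l := by
  induction l generalizing d with
  | nil => cases h : d.get? x <;> simp [bBuild, aFind, h]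
  | cons p rest ih =>
    obtain ⟨i, g⟩ := p
    simp only [bBuild, aFind]
    rw [ih, get?_bFillGroup]
    cases h : d.get? x <;> by_cases hg : x ∈ g <;> simp [hg]

-- A's foldl-with-append loop is a filterMap
lemma foldl_opt_append (f : Int → Option Int) (items : List Int) (acc : List Int) :
    items.foldl (fun acc item =>
      match f item with
      | some i => acc ++ [i]
      | none => acc) acc = acc ++ items.filterMap f := by
  induction items generalizing acc with
  | nil => simp
  | cons x t ih =>
    simp only [List.foldl_cons, List.filterMap_cons]
    cases h : f x <;> simp [h, ih]

-- ===== VERDICT (by name: the statement is the Claim_ definition above) =====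
theorem get_group_number_spec : Claim_equal_get_group_number := by
  intro items group_list _
  unfold Spec_get_group_number get_group_number get_group_number_alt
  rw [foldl_opt_append]
  simp only [List.nil_append]
  apply List.filterMap_congr
  intro item _
  rw [get?_bBuild]
  simp [PySem.Dict.get?_empty]
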